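-- pv_equiv track=rewrite | github.com/LanaCoyote/lancey.space | possem/twitter_utils.py | twitter_len
-- ===== SOURCE A (Python) =====
-- def twitter_len( s ) :
--   words   = s.split( " " )
--   length  = s.count( " " )
--
--   for word in words :
--     # this is probably not the best way to parse out links
--     if "." in word and len( word ) > 21 and not ( word.startswith( "." ) or word.endswith( "." ) ) :
--       length += 21
--     # for ordinary words, just add the word length
--     else :
--       length += len( word )
--
--   return length
-- ===== SOURCE B (Python) =====
-- def twitter_len(s):
--     # Character-level state machine: one pass over the characters, no split().
--     # Tracks the current word's length, whether it contains a dot, and its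
--     # first and last characters; flushes the word's contribution at each space.
--     total = 0
--     wlen = 0
--     has_dot = False
--     first = None
--     last = None
--     for c in s:
--         if c == ' ':
--             if has_dot and wlen > 21 and first != '.' and last != '.':
--                 total += 21
--             else:
--                 total += wlen
--             total += 1
--             wlen = 0
--             has_dot = False
--             first = None
--             last = None
--         else:
--             if wlen == 0:
--                 first = c
--             last = c
--             wlen += 1
--             if c == '.':
--                 has_dot = True
--     if has_dot and wlen > 21 and first != '.' and last != '.':
--         total += 21
--     else:
--         total += wlen
--     return total
-- ===== Notes on version B (the rewrite author's own statement) =====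
-- stated objective: alternative
-- what changed: B replaces split-then-loop-over-words with a single character-level state machine: it never builds the word list, instead tracking the current word's length, dot flag, and first/last characters, and flushing each word's contribution (21 for links) at every space and at the end.
import Mathlib
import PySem

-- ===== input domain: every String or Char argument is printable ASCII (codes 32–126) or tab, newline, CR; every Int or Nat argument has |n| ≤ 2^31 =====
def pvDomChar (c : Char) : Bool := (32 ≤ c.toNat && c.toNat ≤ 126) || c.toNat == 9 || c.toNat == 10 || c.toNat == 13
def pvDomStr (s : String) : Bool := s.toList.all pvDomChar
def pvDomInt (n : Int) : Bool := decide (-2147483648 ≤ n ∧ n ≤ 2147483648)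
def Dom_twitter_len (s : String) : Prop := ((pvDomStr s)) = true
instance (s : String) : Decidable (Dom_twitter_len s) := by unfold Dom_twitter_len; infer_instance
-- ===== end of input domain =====

-- B is an alternative: one character-level state machine (no split) instead of split-then-loop.

-- ===== PORT A =====
def twitter_len (s : String) : Int :=
  let words := PySem.Chars.splitOn s.toList [' ']
  let length : Int := (PySem.Str.count s " " : Nat)
  words.foldl (fun acc word =>
    if PySem.Chars.isIn ['.'] word && decide (21 < PySem.Chars.len word)
        && !(PySem.Chars.startswith word ['.'] || PySem.Chars.endswith word ['.']) then
      acc + 21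
    else
      acc + PySem.Chars.len word) length

-- ===== PORT B =====
-- state = (total, wlen, has_dot, first, last); Python's `None` sentinel for first/last is Option.none
def pvScanStep (st : Int × Int × Bool × Option Char × Option Char) (c : Char) :
    Int × Int × Bool × Option Char × Option Char :=
  let (total, wlen, hasDot, first, last) := st
  if c == ' ' then
    ((if hasDot && decide (21 < wlen) && !(first == some '.') && !(last == some '.') then
        total + 21
      else
        total + wlen) + 1, 0, false, none, none)
  else
    (total, wlen + 1, hasDot || (c == '.'),
      (if wlen == 0 then some c else first), some c)

def pvScanFin (st : Int × Int × Bool × Option Char × Option Char) : Int :=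
  let (total, wlen, hasDot, first, last) := st
  if hasDot && decide (21 < wlen) && !(first == some '.') && !(last == some '.') then
    total + 21
  else
    total + wlen

def twitter_len_alt (s : String) : Int :=
  pvScanFin (s.toList.foldl pvScanStep (0, 0, false, none, none))

-- ===== PRECONDITION & SPEC =====
def Spec_twitter_len (s : String) (out : Int) : Prop := out = twitter_len_alt s
instance (s : String) (out : Int) : Decidable (Spec_twitter_len s out) := by unfold Spec_twitter_len; infer_instance

-- ===== CLAIM (what is proved, stated in full; the proofs are below) =====
def Claim_equal_twitter_len : Prop := ∀ (s : String), Dom_twitter_len s → Spec_twitter_len s (twitter_len s)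

-- ===== LEMMAS AND PROOFS =====

-- the per-word contribution in A's loop
def pvContrib (w : List Char) : Int :=
  if PySem.Chars.isIn ['.'] w && decide (21 < PySem.Chars.len w)
      && !(PySem.Chars.startswith w ['.'] || PySem.Chars.endswith w ['.']) then
    21
  else
    PySem.Chars.len w

-- B's state after scanning a word whose characters, reversed, are `cur`
def pvStOf (total : Int) (cur : List Char) : Int × Int × Bool × Option Char × Option Char :=
  (total, (cur.length : Int), cur.contains '.', cur.getLast?, cur.head?)

theorem pv_foldl_A (P : List Char → Bool) (x y : List Char → Int) :
    ∀ (ws : List (List Char)) (init : Int),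
      ws.foldl (fun a w => if P w then a + x w else a + y w) init
        = init + (ws.map (fun w => if P w then x w else y w)).sum := by
  intro ws
  induction ws with
  | nil => intro init; simp
  | cons w ws ih =>
    intro init
    simp only [List.foldl_cons, List.map_cons, List.sum_cons, ih]
    by_cases h : P w = true <;> simp [h] <;> ring

theorem pv_countgo (fuel : Nat) :
    ∀ (l : List Char) (acc : Nat), l.length ≤ fuel →
      PySem.Chars.count.go [' '] fuel l acc = acc + l.countP (· == ' ') := by
  induction fuel with
  | zero =>
    intro l acc h
    have hl : l = [] := List.eq_nil_of_length_eq_zero (Nat.le_zero.mp h)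
    subst hl; simp [PySem.Chars.count.go]
  | succ fuel ih =>
    intro l acc h
    cases l with
    | nil => simp [PySem.Chars.count.go]
    | cons c rest =>
      rw [PySem.Chars.count.go]
      by_cases hc : c = ' '
      · subst hc
        simp only [List.isPrefixOf, BEq.rfl, Bool.true_and, if_true]
        have hd : List.drop [' '].length (' ' :: rest) = rest := by simp
        rw [hd, ih _ _ (by simp at h; omega)]
        have hcp : List.countP (fun x => x == ' ') (' ' :: rest)
            = List.countP (fun x => x == ' ') rest + 1 := by simp
        omega
      · have hp : [' '].isPrefixOf (c :: rest) = false := by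
          simp [List.isPrefixOf]; exact fun hcc => (hc hcc.symm).elim
        rw [hp]
        simp only [if_false, Bool.false_eq_true]
        rw [ih _ _ (by simp at h; omega)]
        have hcp : List.countP (fun x => x == ' ') (c :: rest)
            = List.countP (fun x => x == ' ') rest := by
          simp [List.countP_cons]; exact fun hcc => (hc hcc).elim
        omega

-- '.' ∈ w ↔ isIn ['.'] w
theorem pv_isIn_singleton (w : List Char) :
    PySem.Chars.isIn ['.'] w = w.contains '.' := by
  by_cases h : ('.' : Char) ∈ w
  · rw [(PySem.Chars.isIn_iff_infix _ _).mpr]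
    · simp [h]
    · obtain ⟨l₁, l₂, rfl⟩ := List.mem_iff_append.mp h
      exact ⟨l₁, l₂, by simp⟩
  · rw [(PySem.Chars.isIn_eq_false_iff _ _).mpr]
    · simp [h]
    · intro ⟨l₁, l₂, hw⟩
      exact h (by rw [← hw]; simp)

theorem pv_startswith_singleton (w : List Char) :
    PySem.Chars.startswith w ['.'] = (w.head? == some '.') := by
  cases w with
  | nil => simp [PySem.Chars.startswith, List.isPrefixOf]
  | cons c rest =>
    simp only [PySem.Chars.startswith, List.isPrefixOf, Bool.and_true,
      List.head?_cons]
    cases hc : (c == '.') <;> simp_all [BEq.comm]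

theorem pv_endswith_singleton (w : List Char) :
    PySem.Chars.endswith w ['.'] = (w.getLast? == some '.') := by
  have : PySem.Chars.endswith w ['.'] = PySem.Chars.startswith w.reverse ['.'] := by
    simp only [PySem.Chars.endswith, PySem.Chars.startswith, List.isSuffixOf]
    rfl
  rw [this, pv_startswith_singleton, List.head?_reverse]

-- flushing B's state yields A's per-word contribution for the (reversed) current word
theorem pv_fin_stOf (total : Int) (cur : List Char) :
    pvScanFin (pvStOf total cur) = total + pvContrib cur.reverse := by
  simp only [pvScanFin, pvStOf, pvContrib, pv_isIn_singleton, pv_startswith_singleton,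
    pv_endswith_singleton, PySem.Chars.len_eq, List.head?_reverse, List.getLast?_reverse,
    List.contains_reverse, List.length_reverse]
  have h21 : (decide (21 < (cur.length : Int))) = decide (21 < cur.length) := by
    simp
  rw [h21]
  by_cases h1 : cur.contains '.' = true <;>
    by_cases h2 : 21 < cur.length <;>
      by_cases h3 : (cur.getLast? == some '.') = true <;>
        by_cases h4 : (cur.head? == some '.') = true <;>
          simp [h2, h3, h4] <;> split_ifs <;> ring

-- a non-space character extends the current word
theorem pv_step_nonspace (total : Int) (cur : List Char) (c : Char) (hc : ¬ c = ' ') :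
    pvScanStep (pvStOf total cur) c = pvStOf total (c :: cur) := by
  simp only [pvScanStep, pvStOf]
  rw [if_neg (by simp [hc])]
  have hcd : (c == '.') = decide (('.' : Char) = c) := by
    by_cases hq : c = '.'
    · simp [hq]
    · simp [hq, Ne.symm hq]
  have h2 : (cur.contains '.' || (c == '.')) = (c :: cur).contains '.' := by
    simp [Bool.or_comm, hcd]
  have h3 : (if ((cur.length : Int)) == 0 then some c else cur.getLast?) = (c :: cur).getLast? := by
    cases cur with
    | nil => simp
    | cons a l =>
      rw [if_neg (by simp only [List.length_cons, beq_iff_eq]; push_cast; omega)]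
      simp [List.getLast?_cons_cons]
  rw [h2, h3]
  simp [List.length_cons]

-- a space flushes the current word and counts itself
theorem pv_step_space (total : Int) (cur : List Char) :
    pvScanStep (pvStOf total cur) ' '
      = pvStOf (total + pvContrib cur.reverse + 1) [] := by
  have := pv_fin_stOf total cur
  simp only [pvScanFin, pvStOf] at this
  simp only [pvScanStep, pvStOf, if_pos (by simp : ((' ' : Char) == ' ') = true)]
  simp only [this, List.length_nil, List.contains_nil, List.getLast?_nil, List.head?_nil]
  rfl

-- main invariant: scanning l from state (total, word cur.reverse) = total + spaces + contributions of the words splitOn.go yields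
theorem pv_main (fuel : Nat) :
    ∀ (l cur : List Char) (acc : List (List Char)) (total : Int), l.length < fuel →
      pvScanFin (l.foldl pvScanStep (pvStOf total cur)) + ((acc.map pvContrib).sum)
        = total + (l.countP (· == ' ') : Nat)
            + (((PySem.Chars.splitOn.go [' '] fuel l cur acc).map pvContrib).sum) := by
  induction fuel with
  | zero => intro l cur acc total h; omega
  | succ fuel ih =>
    intro l cur acc total h
    cases l with
    | nil =>
      rw [PySem.Chars.splitOn.go]
      simp [pv_fin_stOf]
      ring
      omega
    | cons c rest =>
      rw [PySem.Chars.splitOn.go]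
      by_cases hc : c = ' '
      · subst hc
        simp only [List.isPrefixOf, BEq.rfl, Bool.true_and, if_true,
          List.length_cons, List.drop_succ_cons, List.foldl_cons, pv_step_space]
        have hih := ih rest [] (cur.reverse :: acc) (total + pvContrib cur.reverse + 1)
          (by simp at h; omega)
        simp only [List.map_cons, List.sum_cons] at hih
        simp only [List.length_nil, List.drop_zero, List.countP_cons, BEq.rfl, if_pos]
        push_cast
        linarith [hih]
      · have hp : [' '].isPrefixOf (c :: rest) = false := by
          simp [List.isPrefixOf]; exact fun hcc => (hc hcc.symm).elim
        rw [hp]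
        simp only [if_false, Bool.false_eq_true, List.foldl_cons, pv_step_nonspace total cur c hc]
        rw [ih rest (c :: cur) acc total (by simp at h; omega)]
        have hcp : List.countP (fun x => x == ' ') (c :: rest)
            = List.countP (fun x => x == ' ') rest := by
          simp [List.countP_cons]; exact fun hcc => (hc hcc).elim
        simp [hcp]

-- ===== VERDICT (by name: the statement is the Claim_ definition above) =====
theorem twitter_len_spec : Claim_equal_twitter_len := by
  intro s _
  unfold Spec_twitter_len twitter_len twitter_len_alt
  simp only []
  rw [pv_foldl_A]
  have hstart : ((0 : Int), (0 : Int), false, (none : Option Char), (none : Option Char))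
      = pvStOf 0 [] := by rfl
  rw [hstart]
  have hmain := pv_main (s.toList.length + 1) s.toList [] [] 0 (by omega)
  simp only [List.map_nil, List.sum_nil, add_zero] at hmain
  have hfun : (fun w => if (PySem.Chars.isIn ['.'] w && decide (21 < PySem.Chars.len w)
      && !(PySem.Chars.startswith w ['.'] || PySem.Chars.endswith w ['.'])) = true
      then (21 : Int) else PySem.Chars.len w) = pvContrib := by
    funext w; simp [pvContrib]
  rw [hfun]
  have hws : (" ".toList : List Char) = [' '] := rfl
  simp only [PySem.Str.count, hws, PySem.Chars.count, PySem.Chars.splitOn,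
    List.isEmpty_cons, Bool.false_eq_true, if_false]
  rw [pv_countgo s.toList.length s.toList 0 (le_refl _)]
  push_cast
  linarith [hmain]
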